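-- pv_equiv track=rewrite | github.com/fluffy-dev/tetrika-solutions | task3/solution.py | _calculate_overlap_duration
-- ===== SOURCE A (Python) =====
-- from typing import List, Dict, Tuple
--
-- def _calculate_overlap_duration(
--         intervals1: List[Tuple[int, int]],
--         intervals2: List[Tuple[int, int]]
-- ) -> int:
--     """
-- Calculates the total duration of overlap between two lists of time intervals.
-- Overlapping segments are merged before summing their durations.
--     """
--     common_segments = []
--     for r1_start, r1_end in intervals1:
--         for r2_start, r2_end in intervals2:
--             overlap_start = max(r1_start, r2_start)
--             overlap_end = min(r1_end, r2_end)
--             if overlap_start < overlap_end: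
--                 common_segments.append((overlap_start, overlap_end))
--
--     if not common_segments:
--         return 0
--
--     common_segments.sort(key=lambda x: x[0])
--
--     merged_segments = []
--     current_merged_start, current_merged_end = common_segments[0]
--
--     for i in range(1, len(common_segments)):
--         next_start, next_end = common_segments[i]
--         if next_start < current_merged_end:
--             current_merged_end = max(current_merged_end, next_end)
--         else:
--             merged_segments.append((current_merged_start, current_merged_end))
--             current_merged_start, current_merged_end = next_start, next_end
--     merged_segments.append((current_merged_start, current_merged_end))
--
--     total_duration = 0
--     for start, end in merged_segments:
--         total_duration += (end - start)
--     return total_duration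
-- ===== SOURCE B (Python) =====
-- from typing import List, Tuple
--
-- def _merge(intervals):
--     """Sort the non-empty intervals by start and coalesce overlapping/touching ones."""
--     segs = sorted(((a, b) for a, b in intervals if a < b), key=lambda p: p[0])
--     if not segs:
--         return []
--     out = []
--     cs, ce = segs[0]
--     for s, e in segs[1:]:
--         if s <= ce:
--             ce = max(ce, e)
--         else:
--             out.append((cs, ce))
--             cs, ce = s, e
--     out.append((cs, ce))
--     return out
--
-- def _calculate_overlap_duration(
--         intervals1: List[Tuple[int, int]],
--         intervals2: List[Tuple[int, int]]
-- ) -> int: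
--     xs = _merge(intervals1)
--     ys = _merge(intervals2)
--     i = j = 0
--     total = 0
--     while i < len(xs) and j < len(ys):
--         lo = max(xs[i][0], ys[j][0])
--         hi = min(xs[i][1], ys[j][1])
--         if lo < hi:
--             total += hi - lo
--         if xs[i][1] <= ys[j][1]:
--             i += 1
--         else:
--             j += 1
--     return total
-- ===== Notes on version B (the rewrite author's own statement) =====
-- stated objective: faster
-- what changed: Instead of materialising all n*m pairwise intersections and sort-merging them, B merges each interval list separately and computes the overlap with a linear two-pointer sweep over the two merged lists.
import Mathlib
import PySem

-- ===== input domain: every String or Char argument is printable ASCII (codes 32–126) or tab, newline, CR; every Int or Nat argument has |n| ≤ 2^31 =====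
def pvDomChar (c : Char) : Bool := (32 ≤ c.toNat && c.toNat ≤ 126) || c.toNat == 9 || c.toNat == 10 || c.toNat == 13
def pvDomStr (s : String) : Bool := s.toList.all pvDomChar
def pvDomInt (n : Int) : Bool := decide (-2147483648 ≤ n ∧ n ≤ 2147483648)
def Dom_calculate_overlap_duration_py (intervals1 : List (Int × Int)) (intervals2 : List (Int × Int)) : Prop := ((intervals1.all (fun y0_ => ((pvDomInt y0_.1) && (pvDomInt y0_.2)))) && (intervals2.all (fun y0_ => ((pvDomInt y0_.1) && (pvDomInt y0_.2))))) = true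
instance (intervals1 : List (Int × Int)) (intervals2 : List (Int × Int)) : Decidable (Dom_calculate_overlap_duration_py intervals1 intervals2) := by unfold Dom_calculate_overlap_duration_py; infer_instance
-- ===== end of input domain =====

-- B replaces A's O(n*m) pairwise-intersection list + sort + merge by merging each
-- interval list separately and a linear two-pointer sweep (objective: faster, asymptotic).


-- ===== PORT A =====
-- A: build every pairwise intersection, early-return 0 if none, sort by start,
-- merge (strict '<' rule) into a list, then sum the merged lengths.
def calculate_overlap_duration_py (intervals1 : List (Int × Int)) (intervals2 : List (Int × Int)) : Int :=
  let common := intervals1.foldl (fun acc p =>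
    intervals2.foldl (fun acc q =>
      let os := max p.1 q.1
      let oe := min p.2 q.2
      if os < oe then acc ++ [(os, oe)] else acc) acc) []
  if common = [] then 0
  else
    let sortedc := PySem.List.sorted common (fun x => x.1) false
    match sortedc with
    | [] => 0
    | (c0s, c0e) :: rest =>
      let st := rest.foldl (fun (st : List (Int × Int) × Int × Int) q =>
        if q.1 < st.2.2 then (st.1, st.2.1, max st.2.2 q.2)
        else (st.1 ++ [(st.2.1, st.2.2)], q.1, q.2)) ([], c0s, c0e)
      let merged := st.1 ++ [(st.2.1, st.2.2)]
      merged.foldl (fun t p => t + (p.2 - p.1)) 0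

-- ===== PORT B =====
-- _merge: drop empty intervals, sort by start, coalesce with the '≤' rule.
def pvMergeB (iv : List (Int × Int)) : List (Int × Int) :=
  let segs := PySem.List.sorted (iv.filter (fun p => decide (p.1 < p.2))) (fun p => p.1) false
  match segs with
  | [] => []
  | (c0s, c0e) :: rest =>
    let st := rest.foldl (fun (st : List (Int × Int) × Int × Int) q =>
      if q.1 ≤ st.2.2 then (st.1, st.2.1, max st.2.2 q.2)
      else (st.1 ++ [(st.2.1, st.2.2)], q.1, q.2)) ([], c0s, c0e)
    st.1 ++ [(st.2.1, st.2.2)]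

-- the two-pointer while-loop of B, as recursion on the two lists
def pvSweep : List (Int × Int) → List (Int × Int) → Int
  | [], _ => 0
  | _ :: _, [] => 0
  | (s1, e1) :: t1, (s2, e2) :: t2 =>
    let lo := max s1 s2
    let hi := min e1 e2
    let add := if lo < hi then hi - lo else 0
    if e1 ≤ e2 then add + pvSweep t1 ((s2, e2) :: t2)
    else add + pvSweep ((s1, e1) :: t1) t2
termination_by x y => x.length + y.length

def calculate_overlap_duration_py_alt (intervals1 : List (Int × Int)) (intervals2 : List (Int × Int)) : Int :=
  pvSweep (pvMergeB intervals1) (pvMergeB intervals2)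

-- ===== PRECONDITION & SPEC =====
def Spec_calculate_overlap_duration_py (intervals1 : List (Int × Int)) (intervals2 : List (Int × Int)) (out : Int) : Prop := out = calculate_overlap_duration_py_alt intervals1 intervals2
instance (intervals1 : List (Int × Int)) (intervals2 : List (Int × Int)) (out : Int) : Decidable (Spec_calculate_overlap_duration_py intervals1 intervals2 out) := by unfold Spec_calculate_overlap_duration_py; infer_instance

-- ===== CLAIM (what is proved, stated in full; the proofs are below) =====
def Claim_equal_calculate_overlap_duration_py : Prop := ∀ (intervals1 : List (Int × Int)) (intervals2 : List (Int × Int)), Dom_calculate_overlap_duration_py intervals1 intervals2 → Spec_calculate_overlap_duration_py intervals1 intervals2 (calculate_overlap_duration_py intervals1 intervals2)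

-- ===== LEMMAS AND PROOFS =====

-- the set of integers covered by a list of half-open intervals
noncomputable def pvU : List (Int × Int) → Finset Int
  | [] => ∅
  | p :: t => Finset.Ico p.1 p.2 ∪ pvU t

theorem mem_pvU (x : Int) (l : List (Int × Int)) :
    x ∈ pvU l ↔ ∃ p ∈ l, p.1 ≤ x ∧ x < p.2 := by
  induction l with
  | nil => simp [pvU]
  | cons h t ih => simp [pvU, ih, Finset.mem_Ico]

theorem pvU_append (xs ys : List (Int × Int)) : pvU (xs ++ ys) = pvU xs ∪ pvU ys := by
  induction xs with
  | nil => simp [pvU]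
  | cons h t ih => simp [pvU, ih, Finset.union_assoc]

theorem pvU_perm {xs ys : List (Int × Int)} (h : xs.Perm ys) : pvU xs = pvU ys := by
  induction h with
  | nil => rfl
  | cons x _ ih => simp [pvU, ih]
  | swap x y l =>
      simp only [pvU, ← Finset.union_assoc]
      rw [Finset.union_comm (Finset.Ico y.1 y.2)]
  | trans _ _ ih1 ih2 => rw [ih1, ih2]

-- ---------- A side ----------

-- structural mirror of A's merge-then-sum loop
def pvMergeSumA (cs ce : Int) : List (Int × Int) → Int
  | [] => ce - cs
  | (s, e) :: t => if s < ce then pvMergeSumA cs (max ce e) t else (ce - cs) + pvMergeSumA s e t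

theorem A_bridge (rest : List (Int × Int)) : ∀ (out : List (Int × Int)) (cs ce : Int),
    (((rest.foldl (fun (st : List (Int × Int) × Int × Int) q =>
        if q.1 < st.2.2 then (st.1, st.2.1, max st.2.2 q.2)
        else (st.1 ++ [(st.2.1, st.2.2)], q.1, q.2)) (out, cs, ce)).1
      ++ [((rest.foldl (fun (st : List (Int × Int) × Int × Int) q =>
        if q.1 < st.2.2 then (st.1, st.2.1, max st.2.2 q.2)
        else (st.1 ++ [(st.2.1, st.2.2)], q.1, q.2)) (out, cs, ce)).2.1,
           (rest.foldl (fun (st : List (Int × Int) × Int × Int) q =>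
        if q.1 < st.2.2 then (st.1, st.2.1, max st.2.2 q.2)
        else (st.1 ++ [(st.2.1, st.2.2)], q.1, q.2)) (out, cs, ce)).2.2)]).foldl
        (fun t p => t + (p.2 - p.1)) 0)
    = (out.foldl (fun t p => t + (p.2 - p.1)) 0) + pvMergeSumA cs ce rest := by
  induction rest with
  | nil => intro out cs ce; simp [List.foldl_append, pvMergeSumA]
  | cons hd t ih =>
    intro out cs ce
    obtain ⟨s, e⟩ := hd
    simp only [List.foldl_cons]
    by_cases h : s < ce
    · rw [if_pos h, ih, pvMergeSumA, if_pos h]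
    · rw [if_neg h, ih, pvMergeSumA, if_neg h]
      simp [List.foldl_append]
      omega

theorem pvMergeSumA_card : ∀ (rest : List (Int × Int)) (cs ce : Int), cs < ce →
    (∀ p ∈ rest, p.1 < p.2) → (∀ p ∈ rest, cs ≤ p.1) →
    rest.Pairwise (fun p q => p.1 ≤ q.1) →
    pvMergeSumA cs ce rest = ((Finset.Ico cs ce ∪ pvU rest).card : Int) := by
  intro rest
  induction rest with
  | nil => intro cs ce h _ _ _; simp [pvMergeSumA, pvU, Int.card_Ico]; omega
  | cons hd t ih =>
    intro cs ce hlt hv hlo hp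
    obtain ⟨s, e⟩ := hd
    have hse : s < e := hv (s, e) (by simp)
    have hcs : cs ≤ s := hlo (s, e) (by simp)
    have hv' : ∀ p ∈ t, p.1 < p.2 := fun p hp' => hv p (by simp [hp'])
    obtain ⟨hhead, htail⟩ := List.pairwise_cons.mp hp
    by_cases h : s < ce
    · rw [pvMergeSumA, if_pos h,
        ih cs (max ce e) (by omega) hv' (fun p hp' => le_trans hcs (hhead p hp')) htail]
      have hsplit : Finset.Ico cs (max ce e) = Finset.Ico cs ce ∪ Finset.Ico s e := by
        ext x; simp only [Finset.mem_Ico, Finset.mem_union]; omega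
      rw [pvU, hsplit, Finset.union_assoc]
    · rw [pvMergeSumA, if_neg h, ih s e hse hv' hhead htail]
      have hdisj : Disjoint (Finset.Ico cs ce) (Finset.Ico s e ∪ pvU t) := by
        rw [Finset.disjoint_left]
        intro x hx hx2
        simp only [Finset.mem_Ico] at hx
        simp only [Finset.mem_union, Finset.mem_Ico, mem_pvU] at hx2
        rcases hx2 with h1 | ⟨p, hpmem, hp1, hp2⟩
        · omega
        · have := hhead p hpmem; omega
      rw [show pvU ((s, e) :: t) = Finset.Ico s e ∪ pvU t from rfl,
        Finset.card_union_of_disjoint hdisj, Int.card_Ico]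
      push_cast
      omega

theorem pvU_inner (p : Int × Int) (l2 : List (Int × Int)) : ∀ acc : List (Int × Int),
    pvU (l2.foldl (fun acc q =>
        let os := max p.1 q.1
        let oe := min p.2 q.2
        if os < oe then acc ++ [(os, oe)] else acc) acc)
    = pvU acc ∪ (Finset.Ico p.1 p.2 ∩ pvU l2) := by
  induction l2 with
  | nil => intro acc; simp [pvU]
  | cons q t ih =>
    intro acc
    simp only [List.foldl_cons]
    by_cases h : max p.1 q.1 < min p.2 q.2
    · rw [if_pos h, ih, pvU_append]
      rw [show pvU [(max p.1 q.1, min p.2 q.2)] = Finset.Ico (max p.1 q.1) (min p.2 q.2) from by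
        simp [pvU]]
      rw [← Finset.Ico_inter_Ico,
        show pvU (q :: t) = Finset.Ico q.1 q.2 ∪ pvU t from rfl,
        Finset.inter_union_distrib_left, Finset.union_assoc]
    · rw [if_neg h, ih,
        show pvU (q :: t) = Finset.Ico q.1 q.2 ∪ pvU t from rfl,
        Finset.inter_union_distrib_left, Finset.Ico_inter_Ico,
        Finset.Ico_eq_empty h]
      simp

theorem pvU_outer (l2 : List (Int × Int)) : ∀ (l1 acc : List (Int × Int)),
    pvU (l1.foldl (fun acc p =>
      l2.foldl (fun acc q =>
        let os := max p.1 q.1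
        let oe := min p.2 q.2
        if os < oe then acc ++ [(os, oe)] else acc) acc) acc)
    = pvU acc ∪ (pvU l1 ∩ pvU l2) := by
  intro l1
  induction l1 with
  | nil => intro acc; simp [pvU]
  | cons p t ih =>
    intro acc
    simp only [List.foldl_cons]
    rw [ih, pvU_inner,
      show pvU (p :: t) = Finset.Ico p.1 p.2 ∪ pvU t from rfl,
      Finset.union_inter_distrib_right, Finset.union_assoc]

theorem mem_inner (p : Int × Int) (l2 : List (Int × Int)) : ∀ (acc : List (Int × Int)) x,
    x ∈ (l2.foldl (fun acc q =>
        let os := max p.1 q.1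
        let oe := min p.2 q.2
        if os < oe then acc ++ [(os, oe)] else acc) acc) → x ∈ acc ∨ x.1 < x.2 := by
  induction l2 with
  | nil => intro acc x hx; exact Or.inl hx
  | cons q t ih =>
    intro acc x hx
    simp only [List.foldl_cons] at hx
    by_cases h : max p.1 q.1 < min p.2 q.2
    · rw [if_pos h] at hx
      rcases ih _ x hx with h2 | h2
      · rcases List.mem_append.mp h2 with h3 | h3
        · exact Or.inl h3
        · simp at h3; subst h3; exact Or.inr h
      · exact Or.inr h2
    · rw [if_neg h] at hx
      exact ih _ x hx

theorem mem_outer (l2 : List (Int × Int)) : ∀ (l1 acc : List (Int × Int)) x,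
    x ∈ (l1.foldl (fun acc p =>
      l2.foldl (fun acc q =>
        let os := max p.1 q.1
        let oe := min p.2 q.2
        if os < oe then acc ++ [(os, oe)] else acc) acc) acc) → x ∈ acc ∨ x.1 < x.2 := by
  intro l1
  induction l1 with
  | nil => intro acc x hx; exact Or.inl hx
  | cons p t ih =>
    intro acc x hx
    simp only [List.foldl_cons] at hx
    rcases ih _ x hx with h2 | h2
    · exact mem_inner p l2 acc x h2
    · exact Or.inr h2

theorem pvU_common (l1 l2 : List (Int × Int)) :
    pvU (l1.foldl (fun acc p =>
      l2.foldl (fun acc q =>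
        let os := max p.1 q.1
        let oe := min p.2 q.2
        if os < oe then acc ++ [(os, oe)] else acc) acc) [])
    = pvU l1 ∩ pvU l2 := by
  have h := pvU_outer l2 l1 []
  simpa [pvU] using h

theorem mem_common_valid (l1 l2 : List (Int × Int)) :
    ∀ q ∈ (l1.foldl (fun acc p =>
      l2.foldl (fun acc q =>
        let os := max p.1 q.1
        let oe := min p.2 q.2
        if os < oe then acc ++ [(os, oe)] else acc) acc) []), q.1 < q.2 := by
  intro q hq
  rcases mem_outer l2 l1 [] q hq with h | h
  · simp at h
  · exact h

theorem A_body (common : List (Int × Int)) (hv : ∀ q ∈ common, q.1 < q.2) :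
    (if common = [] then (0 : Int) else
      match PySem.List.sorted common (fun x => x.1) false with
      | [] => 0
      | (c0s, c0e) :: rest =>
        ((rest.foldl (fun (st : List (Int × Int) × Int × Int) q =>
          if q.1 < st.2.2 then (st.1, st.2.1, max st.2.2 q.2)
          else (st.1 ++ [(st.2.1, st.2.2)], q.1, q.2)) ([], c0s, c0e)).1
        ++ [((rest.foldl (fun (st : List (Int × Int) × Int × Int) q =>
          if q.1 < st.2.2 then (st.1, st.2.1, max st.2.2 q.2)
          else (st.1 ++ [(st.2.1, st.2.2)], q.1, q.2)) ([], c0s, c0e)).2.1,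
             (rest.foldl (fun (st : List (Int × Int) × Int × Int) q =>
          if q.1 < st.2.2 then (st.1, st.2.1, max st.2.2 q.2)
          else (st.1 ++ [(st.2.1, st.2.2)], q.1, q.2)) ([], c0s, c0e)).2.2)]).foldl
          (fun t p => t + (p.2 - p.1)) 0)
    = ((pvU common).card : Int) := by
  by_cases h : common = []
  · simp [h, pvU]
  · rw [if_neg h]
    rcases hs : PySem.List.sorted common (fun x => x.1) false with _ | ⟨⟨c0s, c0e⟩, rest⟩
    · exact absurd ((PySem.List.sorted_eq_nil_iff common _ _).mp hs) h
    · have hperm : ((c0s, c0e) :: rest).Perm common := by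
        rw [← hs]; exact PySem.List.sorted_perm common _ _
      have hpw := PySem.List.sorted_pairwise common (fun x => x.1)
      rw [hs] at hpw
      have hmem : ∀ x ∈ ((c0s, c0e) :: rest), x.1 < x.2 :=
        fun x hx => hv x (hperm.mem_iff.mp hx)
      obtain ⟨hhead, htail⟩ := List.pairwise_cons.mp hpw
      simp only []
      rw [A_bridge rest [] c0s c0e]
      simp only [List.foldl_nil]
      rw [pvMergeSumA_card rest c0s c0e (hmem (c0s, c0e) (by simp))
        (fun p hp => hmem p (by simp [hp])) hhead htail]
      rw [← pvU_perm hperm]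
      simp [pvU]

theorem A_card (l1 l2 : List (Int × Int)) :
    calculate_overlap_duration_py l1 l2 = (((pvU l1 ∩ pvU l2).card : Int)) := by
  rw [← pvU_common l1 l2]
  exact A_body _ (mem_common_valid l1 l2)

-- ---------- B side ----------

-- structural mirror of B's merge loop
def pvMrec (cs ce : Int) : List (Int × Int) → List (Int × Int)
  | [] => [(cs, ce)]
  | (s, e) :: t => if s ≤ ce then pvMrec cs (max ce e) t else (cs, ce) :: pvMrec s e t

theorem B_bridge (rest : List (Int × Int)) : ∀ (out : List (Int × Int)) (cs ce : Int),
    ((rest.foldl (fun (st : List (Int × Int) × Int × Int) q =>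
        if q.1 ≤ st.2.2 then (st.1, st.2.1, max st.2.2 q.2)
        else (st.1 ++ [(st.2.1, st.2.2)], q.1, q.2)) (out, cs, ce)).1
      ++ [((rest.foldl (fun (st : List (Int × Int) × Int × Int) q =>
        if q.1 ≤ st.2.2 then (st.1, st.2.1, max st.2.2 q.2)
        else (st.1 ++ [(st.2.1, st.2.2)], q.1, q.2)) (out, cs, ce)).2.1,
           (rest.foldl (fun (st : List (Int × Int) × Int × Int) q =>
        if q.1 ≤ st.2.2 then (st.1, st.2.1, max st.2.2 q.2)
        else (st.1 ++ [(st.2.1, st.2.2)], q.1, q.2)) (out, cs, ce)).2.2)])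
    = out ++ pvMrec cs ce rest := by
  induction rest with
  | nil => intro out cs ce; simp [pvMrec]
  | cons hd t ih =>
    intro out cs ce
    obtain ⟨s, e⟩ := hd
    simp only [List.foldl_cons]
    by_cases h : s ≤ ce
    · rw [if_pos h, ih, pvMrec, if_pos h]
    · rw [if_neg h, ih, pvMrec, if_neg h]
      simp

theorem pvMrec_spec : ∀ (rest : List (Int × Int)) (cs ce : Int), cs < ce →
    (∀ p ∈ rest, p.1 < p.2) → (∀ p ∈ rest, cs ≤ p.1) →
    rest.Pairwise (fun p q => p.1 ≤ q.1) →
    (∀ p ∈ pvMrec cs ce rest, p.1 < p.2 ∧ cs ≤ p.1) ∧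
    (pvMrec cs ce rest).Pairwise (fun p q => p.2 ≤ q.1) ∧
    pvU (pvMrec cs ce rest) = Finset.Ico cs ce ∪ pvU rest := by
  intro rest
  induction rest with
  | nil =>
    intro cs ce hlt _ _ _
    refine ⟨?_, by simp [pvMrec], by simp [pvMrec, pvU]⟩
    intro p hp
    simp [pvMrec] at hp
    subst hp
    exact ⟨hlt, le_refl _⟩
  | cons hd t ih =>
    intro cs ce hlt hv hlo hp
    obtain ⟨s, e⟩ := hd
    have hse : s < e := hv (s, e) (by simp)
    have hcs : cs ≤ s := hlo (s, e) (by simp)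
    have hv' : ∀ p ∈ t, p.1 < p.2 := fun p hp' => hv p (by simp [hp'])
    obtain ⟨hhead, htail⟩ := List.pairwise_cons.mp hp
    by_cases h : s ≤ ce
    · rw [pvMrec, if_pos h]
      obtain ⟨m1, m2, m3⟩ :=
        ih cs (max ce e) (by omega) hv' (fun p hp' => le_trans hcs (hhead p hp')) htail
      refine ⟨m1, m2, ?_⟩
      rw [m3]
      have hsplit : Finset.Ico cs (max ce e) = Finset.Ico cs ce ∪ Finset.Ico s e := by
        ext x; simp only [Finset.mem_Ico, Finset.mem_union]; omega
      rw [show pvU ((s, e) :: t) = Finset.Ico s e ∪ pvU t from rfl, hsplit, Finset.union_assoc]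
    · rw [pvMrec, if_neg h]
      obtain ⟨m1, m2, m3⟩ := ih s e hse hv' hhead htail
      refine ⟨?_, ?_, ?_⟩
      · intro p hp
        rcases List.mem_cons.mp hp with rfl | hp'
        · exact ⟨hlt, le_refl _⟩
        · obtain ⟨a, b⟩ := m1 p hp'
          exact ⟨a, by omega⟩
      · refine List.pairwise_cons.mpr ⟨?_, m2⟩
        intro q hq
        have := (m1 q hq).2
        simp only []
        omega
      · rw [show pvU ((cs, ce) :: pvMrec s e t) = Finset.Ico cs ce ∪ pvU (pvMrec s e t) from rfl,
          m3, show pvU ((s, e) :: t) = Finset.Ico s e ∪ pvU t from rfl]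

theorem pvU_filter (iv : List (Int × Int)) :
    pvU (iv.filter (fun p => decide (p.1 < p.2))) = pvU iv := by
  induction iv with
  | nil => rfl
  | cons p t ih =>
    by_cases h : p.1 < p.2
    · simp [h, pvU, ih]
    · simp [h, pvU, ih, Finset.Ico_eq_empty h]

theorem pvMergeB_spec (iv : List (Int × Int)) :
    (∀ p ∈ pvMergeB iv, p.1 < p.2) ∧
    (pvMergeB iv).Pairwise (fun p q => p.2 ≤ q.1) ∧
    pvU (pvMergeB iv) = pvU iv := by
  rcases hs : PySem.List.sorted (iv.filter fun p => decide (p.1 < p.2)) (fun p => p.1) false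
    with _ | ⟨⟨c0s, c0e⟩, rest⟩
  · have hM : pvMergeB iv = [] := by
      simp only [pvMergeB]
      rw [hs]
    have hfil : iv.filter (fun p => decide (p.1 < p.2)) = [] :=
      (PySem.List.sorted_eq_nil_iff _ _ _).mp hs
    exact ⟨by simp [hM], by simp [hM], by rw [hM, ← pvU_filter iv, hfil]⟩
  · have hperm : ((c0s, c0e) :: rest).Perm (iv.filter fun p => decide (p.1 < p.2)) := by
      rw [← hs]; exact PySem.List.sorted_perm _ _ _
    have hpw := PySem.List.sorted_pairwise (iv.filter fun p => decide (p.1 < p.2)) (fun p => p.1)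
    rw [hs] at hpw
    have hmem : ∀ x ∈ ((c0s, c0e) :: rest), x.1 < x.2 := by
      intro x hx
      have := (List.mem_filter.mp (hperm.mem_iff.mp hx)).2
      simpa using this
    obtain ⟨hhead, htail⟩ := List.pairwise_cons.mp hpw
    have hM : pvMergeB iv = pvMrec c0s c0e rest := by
      simp only [pvMergeB]
      rw [hs]
      simp only []
      rw [B_bridge rest [] c0s c0e, List.nil_append]
    obtain ⟨m1, m2, m3⟩ := pvMrec_spec rest c0s c0e (hmem (c0s, c0e) (by simp))
      (fun p hp => hmem p (by simp [hp])) hhead htail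
    refine ⟨fun p hp => (m1 p (hM ▸ hp)).1, hM ▸ m2, ?_⟩
    rw [hM, m3, show Finset.Ico c0s c0e ∪ pvU rest = pvU ((c0s, c0e) :: rest) from rfl,
      pvU_perm hperm, pvU_filter]

theorem pvSweep_card : ∀ (X Y : List (Int × Int)),
    (∀ p ∈ X, p.1 < p.2) → X.Pairwise (fun p q => p.2 ≤ q.1) →
    (∀ p ∈ Y, p.1 < p.2) → Y.Pairwise (fun p q => p.2 ≤ q.1) →
    pvSweep X Y = ((pvU X ∩ pvU Y).card : Int) := by
  intro X Y
  induction X, Y using pvSweep.induct with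
  | case1 Y =>
    intro _ _ _ _
    simp [pvSweep, pvU]
  | case2 p t =>
    intro _ _ _ _
    simp [pvSweep, pvU]
  | case3 s1 e1 t1 s2 e2 t2 h ih =>
    intro hXv hXp hYv hYp
    obtain ⟨hX1, hXt⟩ := List.pairwise_cons.mp hXp
    obtain ⟨hY1, hYt⟩ := List.pairwise_cons.mp hYp
    have he1 : s1 < e1 := hXv (s1, e1) (by simp)
    have he2 : s2 < e2 := hYv (s2, e2) (by simp)
    have hA : Finset.Ico s1 e1 ∩ pvU ((s2, e2) :: t2)
        = Finset.Ico (max s1 s2) (min e1 e2) := by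
      rw [show pvU ((s2, e2) :: t2) = Finset.Ico s2 e2 ∪ pvU t2 from rfl,
        Finset.inter_union_distrib_left, Finset.Ico_inter_Ico]
      have hemp : Finset.Ico s1 e1 ∩ pvU t2 = ∅ := by
        rw [Finset.eq_empty_iff_forall_notMem]
        intro x hx
        simp only [Finset.mem_inter, Finset.mem_Ico, mem_pvU] at hx
        obtain ⟨⟨hx1, hx2⟩, p, hpm, hp1, hp2⟩ := hx
        have := hY1 p hpm
        simp only [] at this
        omega
      rw [hemp, Finset.union_empty]
    have hdisj : Disjoint (Finset.Ico s1 e1 ∩ pvU ((s2, e2) :: t2))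
        (pvU t1 ∩ pvU ((s2, e2) :: t2)) := by
      rw [Finset.disjoint_left]
      intro x hx hx2
      rw [hA] at hx
      simp only [Finset.mem_Ico] at hx
      simp only [Finset.mem_inter, mem_pvU] at hx2
      obtain ⟨⟨p, hpm, hp1, hp2⟩, _⟩ := hx2
      have := hX1 p hpm
      simp only [] at this
      omega
    rw [pvSweep, if_pos h,
      ih (fun p hp => hXv p (by simp [hp])) hXt hYv hYp,
      show pvU ((s1, e1) :: t1) = Finset.Ico s1 e1 ∪ pvU t1 from rfl,
      Finset.union_inter_distrib_right, Finset.card_union_of_disjoint hdisj, hA,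
      Int.card_Ico]
    push_cast
    split_ifs with h2 <;> omega
  | case4 s1 e1 t1 s2 e2 t2 h ih =>
    intro hXv hXp hYv hYp
    obtain ⟨hX1, hXt⟩ := List.pairwise_cons.mp hXp
    obtain ⟨hY1, hYt⟩ := List.pairwise_cons.mp hYp
    have he1 : s1 < e1 := hXv (s1, e1) (by simp)
    have he2 : s2 < e2 := hYv (s2, e2) (by simp)
    have hA : pvU ((s1, e1) :: t1) ∩ Finset.Ico s2 e2
        = Finset.Ico (max s1 s2) (min e1 e2) := by
      rw [show pvU ((s1, e1) :: t1) = Finset.Ico s1 e1 ∪ pvU t1 from rfl,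
        Finset.union_inter_distrib_right, Finset.Ico_inter_Ico]
      have hemp : pvU t1 ∩ Finset.Ico s2 e2 = ∅ := by
        rw [Finset.eq_empty_iff_forall_notMem]
        intro x hx
        simp only [Finset.mem_inter, Finset.mem_Ico, mem_pvU] at hx
        obtain ⟨⟨p, hpm, hp1, hp2⟩, hx1, hx2⟩ := hx
        have := hX1 p hpm
        simp only [] at this
        omega
      rw [hemp, Finset.union_empty]
    have hdisj : Disjoint (pvU ((s1, e1) :: t1) ∩ Finset.Ico s2 e2)
        (pvU ((s1, e1) :: t1) ∩ pvU t2) := by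
      rw [Finset.disjoint_left]
      intro x hx hx2
      rw [hA] at hx
      simp only [Finset.mem_Ico] at hx
      simp only [Finset.mem_inter, mem_pvU] at hx2
      obtain ⟨_, p, hpm, hp1, hp2⟩ := hx2
      have := hY1 p hpm
      simp only [] at this
      omega
    rw [pvSweep, if_neg h,
      ih hXv hXp (fun p hp => hYv p (by simp [hp])) hYt,
      show pvU ((s2, e2) :: t2) = Finset.Ico s2 e2 ∪ pvU t2 from rfl,
      Finset.inter_union_distrib_left, Finset.card_union_of_disjoint hdisj, hA,
      Int.card_Ico]
    push_cast
    split_ifs with h2 <;> omega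

theorem B_card (l1 l2 : List (Int × Int)) :
    calculate_overlap_duration_py_alt l1 l2 = (((pvU l1 ∩ pvU l2).card : Int)) := by
  obtain ⟨v1, p1, u1⟩ := pvMergeB_spec l1
  obtain ⟨v2, p2, u2⟩ := pvMergeB_spec l2
  rw [calculate_overlap_duration_py_alt, pvSweep_card _ _ v1 p1 v2 p2, u1, u2]

-- ===== VERDICT (by name: the statement is the Claim_ definition above) =====
theorem calculate_overlap_duration_py_spec : Claim_equal_calculate_overlap_duration_py := by
  intro l1 l2 _
  unfold Spec_calculate_overlap_duration_py
  rw [A_card, B_card]
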